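-- pv_equiv track=rewrite | github.com/kbaridon/PythonForDataScience | 1-Array/ex01/array2D.py | check_size
-- ===== SOURCE A (Python) =====
-- def check_size(lst: list) -> bool:
--     """Take a 2d array and return if the row are the same size or not."""
--     lenght = -1
--     if (len(lst) < 1):
--         return True
--     for row in lst:
--         if (lenght == -1):
--             lenght = len(row)
--         elif (lenght != len(row)):
--             return True
--     return False
-- ===== SOURCE B (Python) =====
-- def check_size(lst: list) -> bool:
--     """Take a 2d array and return if the row are the same size or not."""
--     if len(lst) < 1:
--         return True
--     lengths = [len(row) for row in lst]
--     return min(lengths) != max(lengths)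
-- ===== Notes on version B (the rewrite author's own statement) =====
-- stated objective: alternative
-- what changed: Replaces the -1-sentinel early-exit scan comparing each row to the remembered first length by materializing the list of row lengths and comparing its two extrema: rows differ in size iff min(lengths) != max(lengths).
import Mathlib
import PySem

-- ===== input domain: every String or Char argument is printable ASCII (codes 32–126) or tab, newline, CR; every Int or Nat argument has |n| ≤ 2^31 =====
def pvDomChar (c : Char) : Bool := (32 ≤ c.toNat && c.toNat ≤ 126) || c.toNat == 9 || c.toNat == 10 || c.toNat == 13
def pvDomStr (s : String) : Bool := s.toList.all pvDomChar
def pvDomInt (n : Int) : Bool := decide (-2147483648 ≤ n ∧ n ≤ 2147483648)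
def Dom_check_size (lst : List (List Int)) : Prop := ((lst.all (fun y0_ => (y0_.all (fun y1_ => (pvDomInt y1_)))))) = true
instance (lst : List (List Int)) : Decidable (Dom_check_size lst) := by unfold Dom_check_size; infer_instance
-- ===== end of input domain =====

-- B replaces A's -1-sentinel early-exit scan by computing the list of row lengths and comparing its min and max; objective: alternative (same cost, different algorithm).


-- ===== PORT A =====
-- the for-loop over rows, carrying the 'lenght' sentinel state
def checkSizeLoop (lenght : Int) (rows : List (List Int)) : Bool :=
  match rows with
  | [] => false
  | row :: rest =>
    if lenght == -1 then checkSizeLoop (row.length : Int) rest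
    else if lenght != (row.length : Int) then true
    else checkSizeLoop lenght rest

def check_size (lst : List (List Int)) : Bool :=
  if lst.length < 1 then true
  else checkSizeLoop (-1) lst

-- ===== PORT B =====
def check_size_alt (lst : List (List Int)) : Bool :=
  if lst.length < 1 then true
  else
    let lengths := lst.map (fun row => (row.length : Int))
    decide (PySem.List.min? lengths (fun x => x) ≠ PySem.List.max? lengths (fun x => x))

-- ===== PRECONDITION & SPEC =====
def Spec_check_size (lst : List (List Int)) (out : Bool) : Prop := out = check_size_alt lst
instance (lst : List (List Int)) (out : Bool) : Decidable (Spec_check_size lst out) := by unfold Spec_check_size; infer_instance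

-- ===== CLAIM (what is proved, stated in full; the proofs are below) =====
def Claim_equal_check_size : Prop := ∀ (lst : List (List Int)), Dom_check_size lst → Spec_check_size lst (check_size lst)

-- ===== LEMMAS AND PROOFS =====

-- once the sentinel holds a real (nonnegative) length, the loop is just an 'any mismatch' scan
theorem checkSizeLoop_nonneg (a : Int) (ha : 0 ≤ a) (l : List Int)
    (rows : List (List Int)) (hl : l = rows.map (fun row => (row.length : Int))) :
    checkSizeLoop a rows = l.any (fun x => x != a) := by
  induction rows generalizing l with
  | nil => simp [hl, checkSizeLoop]
  | cons r rs ih =>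
    subst hl
    simp only [checkSizeLoop, List.map_cons, List.any_cons]
    have hne : (a == (-1 : Int)) = false := by
      simp only [beq_eq_false_iff_ne]; omega
    rw [hne]
    by_cases h : a = (r.length : Int)
    · subst h
      simp [ih _ rfl, bne_self_eq_false]
    · have h1 : (a != (r.length : Int)) = true := by simp [bne_iff_ne]; exact h
      have h2 : ((r.length : Int) != a) = true := by simp [bne_iff_ne]; exact fun e => h e.symm
      simp [h1, h2]

-- core: mismatch-scan against the first length = "min of all lengths ≠ max of all lengths"
theorem any_ne_iff_min_max (a : Int) (l : List Int) :
    l.any (fun x => x != a) =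
      decide (PySem.List.min? (a :: l) (fun x => x) ≠ PySem.List.max? (a :: l) (fun x => x)) := by
  obtain ⟨m, hm⟩ : ∃ m, PySem.List.min? (a :: l) (fun x => x) = some m := by
    cases hmin : PySem.List.min? (a :: l) (fun x => x) with
    | none => exact absurd ((PySem.List.min?_eq_none_iff _ _).mp hmin) (by simp)
    | some m => exact ⟨m, rfl⟩
  obtain ⟨M, hM⟩ : ∃ M, PySem.List.max? (a :: l) (fun x => x) = some M := by
    cases hmax : PySem.List.max? (a :: l) (fun x => x) with
    | none => exact absurd ((PySem.List.max?_eq_none_iff _ _).mp hmax) (by simp)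
    | some M => exact ⟨M, rfl⟩
  rw [hm, hM]
  by_cases h : ∀ x ∈ l, x = a
  · have hmem_m : m ∈ a :: l := PySem.List.min?_mem hm
    have hmem_M : M ∈ a :: l := PySem.List.max?_mem hM
    have hma : m = a := by
      rcases List.mem_cons.mp hmem_m with h' | h'
      exacts [h', h _ h']
    have hMa : M = a := by
      rcases List.mem_cons.mp hmem_M with h' | h'
      exacts [h', h _ h']
    have hfalse : l.any (fun x => x != a) = false := by
      simp only [List.any_eq_false]
      intro x hx; simpa [bne_iff_ne] using h x hx
    simp [hfalse, hma, hMa]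
  · push Not at h
    obtain ⟨b, hb, hba⟩ := h
    have hmin := PySem.List.min?_isMin hm
    have hmax := PySem.List.max?_isMax hM
    have h1 : m ≤ a := hmin a (by simp)
    have h2 : a ≤ M := hmax a (by simp)
    have h3 : m ≤ b := hmin b (by simp [hb])
    have h4 : b ≤ M := hmax b (by simp [hb])
    have htrue : l.any (fun x => x != a) = true := by
      simp only [List.any_eq_true]
      exact ⟨b, hb, by simpa [bne_iff_ne] using hba⟩
    have hmM : m ≠ M := by intro e; apply hba; omega
    simp [htrue, hmM]

-- ===== VERDICT (by name: the statement is the Claim_ definition above) =====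
theorem check_size_spec : Claim_equal_check_size := by
  intro lst _
  unfold Spec_check_size check_size check_size_alt
  match lst with
  | [] => simp
  | r :: rs =>
    simp only [List.length_cons]
    rw [if_neg (by omega), if_neg (by omega)]
    have hstep : checkSizeLoop (-1) (r :: rs) = checkSizeLoop (r.length : Int) rs := by
      simp [checkSizeLoop]
    rw [hstep,
      checkSizeLoop_nonneg (r.length : Int) (by positivity) _ rs rfl]
    simpa using any_ne_iff_min_max (r.length : Int) (rs.map (fun row => (row.length : Int)))
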